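-- pv_equiv track=rewrite | github.com/asphaltbuffet/advent-of-code | exercises/2022/03-rucksackReorganization/py/__init__.py | score_mispacked
-- ===== SOURCE A (Python) =====
-- import string
--
-- priority_value = {c: i + 1 for i, c in enumerate(string.ascii_lowercase)}
--
-- def score_mispacked(line: str) -> int:
--     compartment_one = set(line[: len(line) // 2])
--     priority = 0
--
--     for ch in line[len(line) // 2 :]:
--         if ch in compartment_one:
--             priority += priority_value[ch]
--             compartment_one.remove(ch)
--
--     return priority
-- ===== SOURCE B (Python) =====
-- import string
--
-- priority_value = {c: i + 1 for i, c in enumerate(string.ascii_lowercase)}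
--
-- def score_mispacked(line: str) -> int:
--     h = len(line) // 2
--     first, second = line[:h], line[h:]
--     return sum(i + 1 for i, c in enumerate(string.ascii_lowercase)
--                if c in first and c in second)
-- ===== Notes on version B (the rewrite author's own statement) =====
-- stated objective: alternative
-- what changed: Instead of scanning the line and mutating a compartment set, B sweeps the 26-letter alphabet once and adds i+1 for each letter present in both halves (substring membership), so no set is built or mutated at all.
import Mathlib
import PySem

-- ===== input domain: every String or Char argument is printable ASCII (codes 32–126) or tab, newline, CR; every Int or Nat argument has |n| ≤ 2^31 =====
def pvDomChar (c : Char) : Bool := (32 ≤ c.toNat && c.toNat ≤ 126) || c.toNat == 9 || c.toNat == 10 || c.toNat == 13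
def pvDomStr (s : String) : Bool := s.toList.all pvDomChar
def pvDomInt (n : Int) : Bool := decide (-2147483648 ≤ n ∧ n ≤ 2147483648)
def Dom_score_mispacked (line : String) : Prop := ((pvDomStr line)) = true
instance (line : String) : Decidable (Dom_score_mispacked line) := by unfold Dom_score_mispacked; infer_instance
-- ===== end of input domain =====

-- B replaces A's mutating scan of the line with a single sweep over the 26-letter alphabet (alternative decomposition).


-- priority_value = {c: i + 1 for i, c in enumerate(string.ascii_lowercase)}
def pvPriorityValue : PySem.Dict Char Int :=
  (PySem.List.enumerate "abcdefghijklmnopqrstuvwxyz".toList).foldl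
    (fun d p => d.insert p.2 (p.1 + 1)) PySem.Dict.empty

-- ===== PORT A =====
-- priority_value[ch]: getD … 0 is exact under Pre_ (every counted ch is a-z, so the key is present;
-- outside Pre_ Python raises KeyError and the input is excluded).
def score_mispacked (line : String) : Int :=
  let h := PySem.Int.floordiv (PySem.Str.len line) 2
  let c1 := PySem.Set.ofList (PySem.List.slice line.toList none (some h))
  ((PySem.List.slice line.toList (some h) none).foldl
      (fun st ch =>
        if PySem.Set.contains st.1 ch then
          ((PySem.Set.remove? st.1 ch).getD st.1, st.2 + PySem.Dict.getD pvPriorityValue ch 0)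
        else st)
      (c1, (0 : Int))).2

-- ===== PORT B =====
-- 'c in first' on a Python str with a single-char c is exactly list membership (List.contains).
def score_mispacked_alt (line : String) : Int :=
  let h := PySem.Int.floordiv (PySem.Str.len line) 2
  let first := PySem.List.slice line.toList none (some h)
  let second := PySem.List.slice line.toList (some h) none
  (PySem.List.enumerate "abcdefghijklmnopqrstuvwxyz".toList).foldl
    (fun acc p => if first.contains p.2 && second.contains p.2 then acc + (p.1 + 1) else acc)
    0

-- ===== PRECONDITION & SPEC =====
-- Pre_ excludes exactly the inputs where a character common to both halves is not a-z:
-- there A raises KeyError (priority_value holds only lowercase keys); B returns the lowercase-only sum.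
def Pre_score_mispacked (line : String) : Prop :=
  ((line.toList.take (line.toList.length / 2)).all
    (fun c => !(line.toList.drop (line.toList.length / 2)).contains c
              || "abcdefghijklmnopqrstuvwxyz".toList.contains c)) = true
instance (line : String) : Decidable (Pre_score_mispacked line) := by
  unfold Pre_score_mispacked; infer_instance
def pvWitness_score_mispacked : String := "abcabd"

def Spec_score_mispacked (line : String) (out : Int) : Prop := out = score_mispacked_alt line
instance (line : String) (out : Int) : Decidable (Spec_score_mispacked line out) := by
  unfold Spec_score_mispacked; infer_instance

-- ===== CLAIM (what is proved, stated in full; the proofs are below) =====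
def Claim_equal_score_mispacked : Prop := ∀ (line : String), Dom_score_mispacked line → Pre_score_mispacked line → Spec_score_mispacked line (score_mispacked line)

-- ===== LEMMAS AND PROOFS =====

-- A's loop over ys, starting from a duplicate-free set s, accumulates f over the chars of s also occurring in ys.
theorem pv_loop_eq (f : Char → Int) (ys : List Char) (s : List Char) (hs : s.Nodup) (p : Int) :
    (ys.foldl
       (fun st ch =>
         if PySem.Set.contains st.1 ch then
           ((PySem.Set.remove? st.1 ch).getD st.1, st.2 + f ch)
         else st)
       (s, p)).2
    = p + ∑ c ∈ s.toFinset.filter (fun c => c ∈ ys), f c := by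
  induction ys generalizing s p with
  | nil => simp
  | cons ch ys ih =>
    simp only [List.foldl_cons]
    by_cases hc : ch ∈ s
    · have hcont : PySem.Set.contains s ch = true := by
        simpa [PySem.Set.contains] using hc
      rw [if_pos hcont]
      have hrem : (PySem.Set.remove? s ch).getD s = s.filter (fun y => !y == ch) := by
        simp [PySem.Set.remove?, PySem.Set.discard, hc]
      rw [hrem, ih _ (hs.filter _)]
      have hfin : (s.filter (fun y => !y == ch)).toFinset = s.toFinset.erase ch := by
        ext x
        simp [Finset.mem_erase, and_comm]
      rw [hfin]
      have hset : s.toFinset.filter (fun c => c ∈ ch :: ys)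
          = insert ch ((s.toFinset.erase ch).filter (fun c => c ∈ ys)) := by
        ext x
        simp only [Finset.mem_filter, Finset.mem_insert, Finset.mem_erase, List.mem_cons,
          List.mem_toFinset]
        constructor
        · rintro ⟨hx, hx' | hx'⟩
          · exact Or.inl hx'
          · by_cases hxe : x = ch
            · exact Or.inl hxe
            · exact Or.inr ⟨⟨hxe, hx⟩, hx'⟩
        · rintro (rfl | ⟨⟨_, hx⟩, hx'⟩)
          · exact ⟨hc, Or.inl rfl⟩
          · exact ⟨hx, Or.inr hx'⟩
      rw [hset, Finset.sum_insert (by simp)]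
      ring
    · have hcont : PySem.Set.contains s ch = false := by
        simpa [PySem.Set.contains] using hc
      rw [if_neg (by simp [hc])]
      rw [ih _ hs p]
      congr 2
      apply Finset.filter_congr
      intro x hx
      have hxch : x ≠ ch := fun h => hc (h ▸ List.mem_toFinset.mp hx)
      simp [hxch]

-- B's guarded fold over a pair list whose snds are distinct and whose fsts satisfy f c = i + 1
-- equals the Finset sum of f over the snds that pass the test.
theorem pv_sweep_eq (f : Char → Int) (cond : Char → Bool) (L : List (Int × Char))
    (hnd : (L.map Prod.snd).Nodup) (hf : ∀ p ∈ L, f p.2 = p.1 + 1) (a : Int) :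
    L.foldl (fun acc p => if cond p.2 then acc + (p.1 + 1) else acc) a
    = a + ∑ c ∈ (L.map Prod.snd).toFinset.filter (fun c => cond c = true), f c := by
  induction L generalizing a with
  | nil => simp
  | cons p L ih =>
    simp only [List.map_cons, List.nodup_cons] at hnd
    simp only [List.foldl_cons, List.map_cons, List.toFinset_cons]
    have hnotin : p.2 ∉ (L.map Prod.snd).toFinset := by
      simpa using hnd.1
    by_cases hc : cond p.2 = true
    · rw [if_pos hc, ih hnd.2 (fun q hq => hf q (List.mem_cons_of_mem _ hq))]
      rw [Finset.filter_insert, if_pos hc,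
          Finset.sum_insert (by simp only [Finset.mem_filter]; exact fun hh => hnotin hh.1)]
      have := hf p (List.mem_cons_self)
      omega
    · rw [if_neg hc, ih hnd.2 (fun q hq => hf q (List.mem_cons_of_mem _ hq))]
      rw [Finset.filter_insert, if_neg hc]

theorem pv_ofList_toFinset (l : List Char) :
    (PySem.Set.ofList l).toFinset = l.toFinset := by
  ext x; simp [PySem.Set.mem_ofList]

-- ===== VERDICT (by name: the statement is the Claim_ definition above) =====
theorem score_mispacked_spec : Claim_equal_score_mispacked := by
  intro line _ hpre
  unfold Spec_score_mispacked score_mispacked score_mispacked_alt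
  simp only []
  set f : Char → Int := fun c => PySem.Dict.getD pvPriorityValue c 0 with hf
  have hlen : PySem.Str.len line = ((line.toList.length : Nat) : Int) := by
    simp [PySem.Str.len]
  have hdiv : PySem.Int.floordiv (PySem.Str.len line) 2
      = ((line.toList.length / 2 : Nat) : Int) := by
    rw [hlen]
    exact_mod_cast PySem.Int.floordiv_natCast line.toList.length 2
  rw [hdiv, PySem.List.slice_to_natCast, PySem.List.slice_from_natCast]
  set h := line.toList.length / 2
  set first := line.toList.take h with hfirst
  set second := line.toList.drop h with hsecond
  rw [pv_loop_eq f second _ (PySem.Set.nodup_ofList _) 0]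
  rw [pv_sweep_eq f (fun c => first.contains c && second.contains c) _
      (by rw [PySem.List.map_snd_enumerate]; decide)
      (by decide) 0]
  rw [pv_ofList_toFinset]
  have hsets : (("abcdefghijklmnopqrstuvwxyz".toList).toFinset.filter
        (fun c => (first.contains c && second.contains c) = true))
      = first.toFinset.filter (fun c => c ∈ second) := by
    ext x
    simp only [Finset.mem_filter, List.mem_toFinset, Bool.and_eq_true, List.contains_eq_mem,
      decide_eq_true_eq]
    constructor
    · rintro ⟨_, hx⟩; exact hx
    · rintro ⟨hx1, hx2⟩
      have halpha : x ∈ "abcdefghijklmnopqrstuvwxyz".toList := by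
        unfold Pre_score_mispacked at hpre
        rw [List.all_eq_true] at hpre
        have := hpre x hx1
        simp only [Bool.or_eq_true, Bool.not_eq_true', List.contains_eq_mem,
          decide_eq_false_iff_not, decide_eq_true_eq] at this
        rcases this with h' | h'
        · exact absurd hx2 h'
        · exact h'
      exact ⟨halpha, hx1, hx2⟩
  rw [show (PySem.List.enumerate "abcdefghijklmnopqrstuvwxyz".toList).map Prod.snd
      = "abcdefghijklmnopqrstuvwxyz".toList from by
        rw [PySem.List.map_snd_enumerate], hsets]
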